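-- pv_equiv track=rewrite | github.com/GaryChen513/CodeForces | #824/Prob3.py | assignParent
-- ===== SOURCE A (Python) =====
-- def assignParent(seen, parents, letter):
--     if parents[ord(letter) - ord("a")] != letter:
--         return parents[ord(letter) - ord("a")]
--
--     for i in range(26):
--         char = chr(i + ord("a"))
--         if char in seen:
--             continue
--         p1 = find(char, parents)
--         p2 = find(letter, parents)
--         if p1 == p2:
--             continue
--
--         return char
--
--     for i in range(26):
--         char = chr(i + ord("a"))
--         if char in seen:
--             continue
--         return char
--
-- def find(c,parents):
--     while parents[ord(c) - ord("a")] != c: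
--         c = parents[ord(c) - ord("a")]
--
--     return c
-- ===== SOURCE B (Python) =====
-- def assignParent(seen, parents, letter):
--     li = ord(letter) - ord("a")
--     if parents[li] != letter:
--         return parents[li]
--     # Batch-compute every letter's root by pointer doubling over the whole table
--     # (5 squarings cover parent chains of length up to 32 > 26), instead of
--     # walking each letter's chain individually with find().
--     roots = [parents[i] for i in range(26)]
--     for _ in range(5):
--         roots = [roots[ord(c) - ord("a")] for c in roots]
--     target = roots[li]
--     unseen = [chr(i + ord("a")) for i in range(26) if chr(i + ord("a")) not in seen]
--     for c in unseen:
--         if roots[ord(c) - ord("a")] != target: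
--             return c
--     return unseen[0] if unseen else None
-- ===== Notes on version B (the rewrite author's own statement) =====
-- stated objective: alternative
-- what changed: B replaces A's per-letter chain-walking find() entirely: it batch-computes every letter's root with five pointer-doubling (path-squaring) passes over the whole 26-entry table, then does one scan over the precomputed unseen list comparing precomputed roots, with the first unseen letter as fallback.
-- outside the precondition, e.g. on assignParent({'b'}, ['a', 'b', 'b'], 'a'): A returns 'c', B raises IndexError
import Mathlib
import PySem

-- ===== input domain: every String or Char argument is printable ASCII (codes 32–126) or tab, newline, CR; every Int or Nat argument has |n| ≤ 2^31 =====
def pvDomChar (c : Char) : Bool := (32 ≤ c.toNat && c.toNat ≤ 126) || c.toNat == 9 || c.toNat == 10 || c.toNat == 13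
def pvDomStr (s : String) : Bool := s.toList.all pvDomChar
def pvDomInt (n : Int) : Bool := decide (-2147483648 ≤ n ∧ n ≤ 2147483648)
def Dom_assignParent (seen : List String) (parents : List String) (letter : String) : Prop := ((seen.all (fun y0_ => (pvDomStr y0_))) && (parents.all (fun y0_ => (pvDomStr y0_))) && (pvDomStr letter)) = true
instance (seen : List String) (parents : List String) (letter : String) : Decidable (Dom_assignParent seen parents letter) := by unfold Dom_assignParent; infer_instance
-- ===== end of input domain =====

-- B replaces A's per-letter chain-walking find() by one batch pointer-doubling pass computing every
-- letter's root at once, then a single filtered scan; objective: alternative (same order of cost).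


-- ===== PORT A =====
-- chr(i + ord("a")) as a one-character string
def pvChar (i : Nat) : String := String.singleton (Char.ofNat (97 + i))

-- Python's 'find': while parents[ord(c)-97] != c: c = parents[ord(c)-97].
-- Fuel-based port of the while loop; 30 fuel is enough on every input admitted by
-- Pre_assignParent (acyclic 26-entry table ⇒ root reached in ≤ 26 checks).
-- none = exception / non-termination of the Python loop (never hit inside Pre_).
def pvFind (fuel : Nat) (c : String) (parents : List String) : Option String :=
  match fuel with
  | 0 => none
  | fuel + 1 =>
    match c.toList with
    | [ch] =>
      match PySem.List.pyGet? parents ((ch.toNat : Int) - 97) with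
      | none => none
      | some p => if p = c then some c else pvFind fuel p parents
    | _ => none

-- A's first loop: first unseen char whose root differs from letter's root
def aScan1 (seen : List String) (parents : List String) (letter : String) : List Nat → Option String
  | [] => none
  | i :: rest =>
    let char := pvChar i
    if char ∈ seen then aScan1 seen parents letter rest
    else if pvFind 30 char parents = pvFind 30 letter parents then aScan1 seen parents letter rest
    else some char

-- A's second loop: first unseen char
def aScan2 (seen : List String) : List Nat → Option String
  | [] => none
  | i :: rest =>
    let char := pvChar i
    if char ∈ seen then aScan2 seen rest else some char

def assignParent (seen : List String) (parents : List String) (letter : String) : Option String :=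
  match letter.toList with
  | [ch] =>
    match PySem.List.pyGet? parents ((ch.toNat : Int) - 97) with
    | none => none
    | some p =>
      if p ≠ letter then some p
      else
        match aScan1 seen parents letter (List.range 26) with
        | some c => some c
        | none => aScan2 seen (List.range 26)
  | _ => none

-- ===== PORT B =====
-- ord(c) - 97 of a one-character string (Python ord raises on other strings; inside
-- Pre_ every string it is applied to is a single lowercase letter, where this is exact)
def sIdx (c : String) : Nat :=
  match c.toList with
  | [ch] => ch.toNat - 97
  | _ => 26

-- one squaring step: roots = [roots[ord(c) - ord("a")] for c in roots]
-- (the "" default is never used inside Pre_: every entry is a lowercase letter, index < 26)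
def doubleStep (rs : List String) : List String := rs.map (fun c => rs.getD (sIdx c) "")

-- B's final loop: first unseen char whose (precomputed) root differs from target
def bLoop (roots : List String) (target : String) : List String → Option String
  | [] => none
  | c :: rest => if roots.getD (sIdx c) "" ≠ target then some c else bLoop roots target rest

def assignParent_alt (seen : List String) (parents : List String) (letter : String) : Option String :=
  match letter.toList with
  | [ch] =>
    match PySem.List.pyGet? parents ((ch.toNat : Int) - 97) with
    | none => none
    | some p =>
      if p ≠ letter then some p
      else
        -- roots = [parents[i] for i in range(26)] (inside Pre_ the table has ≥ 26 entries, so getD is exact)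
        let roots0 : List String := (List.range 26).map (fun i => parents.getD i "")
        -- for _ in range(5): roots = [roots[ord(c)-97] for c in roots]
        let roots : List String := (List.range 5).foldl (fun rs _ => doubleStep rs) roots0
        let target : String := roots.getD (ch.toNat - 97) ""
        let unseen : List String := ((List.range 26).filter (fun i => !decide (pvChar i ∈ seen))).map pvChar
        match bLoop roots target unseen with
        | some c => some c
        | none => unseen.head?   -- unseen[0] if unseen else None
  | _ => none

-- ===== PRECONDITION & SPEC =====
-- entry j of the table is a one-character lowercase string
def pvEntryOK (parents : List String) (j : Nat) : Bool :=
  match parents[j]? with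
  | some s =>
    match s.toList with
    | [c] => decide (97 ≤ c.toNat ∧ c.toNat ≤ 122)
    | _ => false
  | none => false

-- the parent map on indices 0..25 (26 = out of table)
def pvStep (parents : List String) (j : Nat) : Nat :=
  match parents[j]? with
  | some s =>
    match s.toList with
    | [c] => c.toNat - 97
    | _ => 26
  | none => 26

-- well-formed acyclic union-find table over a..z: every entry a one-char lowercase
-- string and every parent chain reaches a self-loop within 26 steps
def pvTableOK (parents : List String) : Bool :=
  (List.range 26).all (fun j =>
    pvEntryOK parents j &&
    decide (pvStep parents ((pvStep parents)^[26] j) = (pvStep parents)^[26] j))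

-- Pre_ excludes inputs where Python A raises (letter not a single character: TypeError;
-- parents[ord(letter)-97] out of range: IndexError) and — when letter is its own parent so the
-- scan loops run — inputs whose parent table is not a well-formed acyclic union-find table over
-- a..z, on which find may raise IndexError/TypeError or loop forever; this blanket table
-- condition also excludes some inputs on which A happens to return because every broken chain
-- starts at a letter in seen (see cites; B raises IndexError there).
def pvPreCheck (_seen : List String) (parents : List String) (letter : String) : Bool :=
  match letter.toList with
  | [ch] =>
    match PySem.List.pyGet? parents ((ch.toNat : Int) - 97) with
    | some p =>
      if p = letter then ((97 ≤ ch.toNat && ch.toNat ≤ 122) && pvTableOK parents) else true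
    | none => false
  | _ => false

def Pre_assignParent (seen : List String) (parents : List String) (letter : String) : Prop :=
  pvPreCheck seen parents letter = true

instance (seen : List String) (parents : List String) (letter : String) : Decidable (Pre_assignParent seen parents letter) := by unfold Pre_assignParent; infer_instance

def pvWitness_assignParent : List String × List String × String :=
  ([], ["a","b","c","d","e","f","g","h","i","j","k","l","m","n","o","p","q","r","s","t","u","v","w","x","y","z"], "a")

def Spec_assignParent (seen : List String) (parents : List String) (letter : String) (out : Option String) : Prop := out = assignParent_alt seen parents letter
instance (seen : List String) (parents : List String) (letter : String) (out : Option String) : Decidable (Spec_assignParent seen parents letter out) := by unfold Spec_assignParent; infer_instance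

-- ===== CLAIM (what is proved, stated in full; the proofs are below) =====
def Claim_equal_assignParent : Prop := ∀ (seen : List String) (parents : List String) (letter : String), Dom_assignParent seen parents letter → Pre_assignParent seen parents letter → Spec_assignParent seen parents letter (assignParent seen parents letter)

-- ===== LEMMAS AND PROOFS =====

lemma toNat_ofNat_97 (n : Nat) (h : n < 26) : (Char.ofNat (97 + n)).toNat = 97 + n := by
  have hv : (97 + n).isValidChar := Or.inl (by omega)
  simp [Char.ofNat, hv]

lemma sIdx_pvChar (n : Nat) (h : n < 26) : sIdx (pvChar n) = n := by
  simp [sIdx, pvChar, String.singleton, toNat_ofNat_97 n h]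

-- facts extracted from pvTableOK: entry j is exactly pvChar (σ j), σ maps 0..25 into 0..25,
-- and every chain is stationary after 26 steps
lemma table_entry (parents : List String) (hok : pvTableOK parents = true)
    (j : Nat) (hj : j < 26) :
    parents[j]? = some (pvChar (pvStep parents j)) ∧ pvStep parents j < 26 := by
  have h := (List.all_eq_true.mp hok) j (by simp [List.mem_range]; omega)
  rw [Bool.and_eq_true] at h
  have he := h.1
  unfold pvEntryOK at he
  unfold pvStep
  cases hg : parents[j]? with
  | none => simp [hg] at he
  | some s =>
    simp only [hg] at he ⊢
    cases hl : s.toList with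
    | nil => simp [hl] at he
    | cons c rest =>
      cases rest with
      | cons _ _ => simp [hl] at he
      | nil =>
        simp only [hl, decide_eq_true_eq] at he ⊢
        constructor
        · congr 1
          apply String.toList_injective
          rw [hl]
          simp only [pvChar, String.singleton]
          have h97 : 97 + (c.toNat - 97) = c.toNat := by omega
          simp [h97, Char.ofNat_toNat]
        · omega

lemma table_fix (parents : List String) (hok : pvTableOK parents = true)
    (j : Nat) (hj : j < 26) :
    pvStep parents ((pvStep parents)^[26] j) = (pvStep parents)^[26] j := by
  have h := (List.all_eq_true.mp hok) j (by simp [List.mem_range]; omega)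
  rw [Bool.and_eq_true] at h
  exact of_decide_eq_true h.2

lemma iterate_lt (parents : List String) (hok : pvTableOK parents = true) :
    ∀ (n j : Nat), j < 26 → (pvStep parents)^[n] j < 26 := by
  intro n
  induction n with
  | zero => intro j hj; simpa using hj
  | succ n ih =>
    intro j hj
    rw [Function.iterate_succ_apply]
    exact ih _ (table_entry parents hok j hj).2

lemma iterate_stable (parents : List String) (hok : pvTableOK parents = true)
    (j : Nat) (hj : j < 26) :
    ∀ k, (pvStep parents)^[26 + k] j = (pvStep parents)^[26] j := by
  intro k
  induction k with
  | zero => rfl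
  | succ k ih =>
    have : 26 + (k + 1) = (26 + k) + 1 := by omega
    rw [this, Function.iterate_succ_apply', ih, table_fix parents hok j hj]

-- the loop invariant for the doubling pass
def RInv (rs : List String) (f : Nat → Nat) : Prop :=
  rs.length = 26 ∧ ∀ j, j < 26 → rs[j]? = some (pvChar (f j))

lemma inv_getD (rs : List String) (f : Nat → Nat) (hinv : RInv rs f)
    (j : Nat) (hj : j < 26) : rs.getD j "" = pvChar (f j) := by
  rw [List.getD_eq_getElem?_getD, hinv.2 j hj]; rfl

lemma inv_doubleStep (rs : List String) (f : Nat → Nat)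
    (hinv : RInv rs f) (hf : ∀ j, j < 26 → f j < 26) :
    RInv (doubleStep rs) (fun j => f (f j)) := by
  constructor
  · simp [doubleStep, hinv.1]
  · intro j hj
    have hjlen : j < rs.length := by rw [hinv.1]; omega
    unfold doubleStep
    rw [List.getElem?_map, (hinv.2 j hj)]
    simp only [Option.map_some]
    congr 1
    rw [sIdx_pvChar (f j) (hf j hj)]
    exact inv_getD rs f hinv (f j) (hf j hj)

lemma inv_roots0 (parents : List String) (hok : pvTableOK parents = true) :
    RInv ((List.range 26).map (fun i => parents.getD i "")) (pvStep parents) := by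
  constructor
  · simp
  · intro j hj
    rw [List.getElem?_map]
    rw [List.getElem?_range (by omega)]
    simp only [Option.map_some]
    congr 1
    rw [List.getD_eq_getElem?_getD, (table_entry parents hok j hj).1]
    rfl

-- pvChar is injective on 0..25
lemma pvChar_inj (a b : Nat) (ha : a < 26) (hb : b < 26) : pvChar a = pvChar b ↔ a = b := by
  constructor
  · intro h
    have h1 := congrArg String.toList h
    simp only [pvChar, String.toList_singleton, List.cons.injEq, and_true] at h1
    have h2 := congrArg Char.toNat h1
    rw [toNat_ofNat_97 a ha, toNat_ofNat_97 b hb] at h2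
    omega
  · intro h; rw [h]

lemma rinv_congr (rs : List String) (f g : Nat → Nat) (h : RInv rs f)
    (hfg : ∀ j, j < 26 → f j = g j) : RInv rs g := by
  refine ⟨h.1, fun j hj => ?_⟩
  rw [h.2 j hj, hfg j hj]

-- after n doubling steps, entry j is pvChar (σ^[2^n] j)
lemma inv_iter (parents : List String) (hok : pvTableOK parents = true) :
    ∀ n, RInv ((fun rs => doubleStep rs)^[n] ((List.range 26).map (fun i => parents.getD i "")))
      (fun j => (pvStep parents)^[2 ^ n] j) := by
  intro n
  induction n with
  | zero =>
    refine rinv_congr _ _ _ (inv_roots0 parents hok) ?_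
    intro j hj; simp
  | succ n ih =>
    rw [Function.iterate_succ_apply']
    refine rinv_congr _ _ _
      (inv_doubleStep _ _ ih (fun j hj => iterate_lt parents hok (2 ^ n) j hj)) ?_
    intro j hj
    rw [← Function.iterate_add_apply]
    congr 1
    have : 2 ^ (n + 1) = 2 ^ n + 2 ^ n := by ring
    omega

lemma foldl_doubleStep : ∀ (n : Nat) (rs : List String),
    (List.range n).foldl (fun rs _ => doubleStep rs) rs = (fun rs => doubleStep rs)^[n] rs := by
  intro n
  induction n with
  | zero => intro rs; rfl
  | succ n ih =>
    intro rs
    rw [List.range_succ, List.foldl_append, ih, Function.iterate_succ_apply']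
    rfl

-- one unrolling of find's while loop
lemma pvFind_step (parents : List String) (hok : pvTableOK parents = true)
    (j : Nat) (hj : j < 26) (fuel : Nat) :
    pvFind (fuel + 1) (pvChar j) parents =
      if pvStep parents j = j then some (pvChar j)
      else pvFind fuel (pvChar (pvStep parents j)) parents := by
  have hl : (pvChar j).toList = [Char.ofNat (97 + j)] := by
    simp [pvChar, String.toList_singleton]
  have hidx : (((Char.ofNat (97 + j)).toNat : Int) - 97) = ((j : Nat) : Int) := by
    rw [toNat_ofNat_97 j hj]; push_cast; ring
  have hget : PySem.List.pyGet? parents (((Char.ofNat (97 + j)).toNat : Int) - 97)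
      = some (pvChar (pvStep parents j)) := by
    rw [hidx, PySem.List.pyGet?_natCast, (table_entry parents hok j hj).1]
  conv_lhs => unfold pvFind
  simp only [hl, hget]
  by_cases h : pvStep parents j = j
  · simp [h]
  · have : pvChar (pvStep parents j) ≠ pvChar j := by
      rw [Ne, pvChar_inj _ _ (table_entry parents hok j hj).2 hj]; exact h
    simp [h, this]

-- pvFind computes the stabilised iterate
lemma pvFind_eq (parents : List String) (hok : pvTableOK parents = true) :
    ∀ (m fuel j : Nat), j < 26 → m < fuel →
      pvStep parents ((pvStep parents)^[m] j) = (pvStep parents)^[m] j →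
      pvFind fuel (pvChar j) parents = some (pvChar ((pvStep parents)^[m] j)) := by
  intro m
  induction m with
  | zero =>
    intro fuel j hj hm hfix
    simp only [Function.iterate_zero, id_eq] at hfix ⊢
    cases fuel with
    | zero => omega
    | succ fuel => rw [pvFind_step parents hok j hj fuel, if_pos hfix]
  | succ m ih =>
    intro fuel j hj hm hfix
    cases fuel with
    | zero => omega
    | succ fuel =>
      rw [pvFind_step parents hok j hj fuel]
      by_cases h0 : pvStep parents j = j
      · rw [if_pos h0, Function.iterate_fixed h0 (m + 1)]
      · rw [if_neg h0]
        have hstep : pvStep parents j < 26 := (table_entry parents hok j hj).2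
        have hfix' : pvStep parents ((pvStep parents)^[m] (pvStep parents j))
            = (pvStep parents)^[m] (pvStep parents j) := by
          rw [← Function.iterate_succ_apply]; exact hfix
        rw [ih fuel (pvStep parents j) hstep (by omega) hfix',
          ← Function.iterate_succ_apply]

lemma aScan2_eq (seen : List String) :
    ∀ l : List Nat,
      aScan2 seen l = ((l.filter (fun i => !decide (pvChar i ∈ seen))).map pvChar).head? := by
  intro l
  induction l with
  | nil => simp [aScan2]
  | cons i rest ih =>
    by_cases hs : pvChar i ∈ seen
    · simp [aScan2, hs, ih]
    · simp [aScan2, hs]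

lemma aScan1_eq (seen parents : List String) (letter : String) (roots : List String)
    (target : String)
    (hlet : pvFind 30 letter parents = some target) :
    ∀ l : List Nat,
      (∀ j ∈ l, j < 26 ∧ pvFind 30 (pvChar j) parents = some (roots.getD j "")) →
      aScan1 seen parents letter l =
        bLoop roots target ((l.filter (fun i => !decide (pvChar i ∈ seen))).map pvChar) := by
  intro l
  induction l with
  | nil => intro _; simp [aScan1, bLoop]
  | cons i rest ih =>
    intro h
    have hi := h i (by simp)
    have hrest : ∀ j ∈ rest, j < 26 ∧ pvFind 30 (pvChar j) parents = some (roots.getD j "") :=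
      fun j hj => h j (by simp [hj])
    by_cases hs : pvChar i ∈ seen
    · simp [aScan1, hs, ih hrest]
    · have hidx := sIdx_pvChar i hi.1
      by_cases heq : roots.getD i "" = target
      <;> have heq' : (roots[i]?.getD "" = target) = (roots.getD i "" = target) := by
            rw [List.getD_eq_getElem?_getD]
      · have hfind : pvFind 30 (pvChar i) parents = pvFind 30 letter parents := by
          rw [hi.2, hlet, heq]
        simp [aScan1, bLoop, hs, hfind, hidx, heq', ih hrest]
        intro hc; exact absurd heq hc
      · have hfind : pvFind 30 (pvChar i) parents ≠ pvFind 30 letter parents := by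
          rw [hi.2, hlet]; simpa using heq
        simp [aScan1, bLoop, hs, hfind, hidx, heq']
        intro hc; exact absurd hc heq

lemma assignParent_eq (seen parents : List String) (letter : String)
    (hpre : Pre_assignParent seen parents letter) :
    assignParent seen parents letter = assignParent_alt seen parents letter := by
  unfold Pre_assignParent pvPreCheck at hpre
  unfold assignParent assignParent_alt
  cases hl : letter.toList with
  | nil => rw [hl] at hpre
  | cons ch rest =>
    cases rest with
    | cons _ _ => rw [hl] at hpre
    | nil =>
      rw [hl] at hpre
      cases hg : PySem.List.pyGet? parents ((ch.toNat : Int) - 97) with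
      | none => simp only [hg] at hpre; exact (Bool.false_ne_true hpre).elim
      | some p =>
        simp only [hg] at hpre ⊢
        by_cases hp : p = letter
        · simp only [hp, if_true] at hpre
          rw [Bool.and_eq_true, Bool.and_eq_true] at hpre
          obtain ⟨⟨h97, h122⟩, hok⟩ := hpre
          have h97' : 97 ≤ ch.toNat := by simpa using h97
          have h122' : ch.toNat ≤ 122 := by simpa using h122
          have hli : ch.toNat - 97 < 26 := by omega
          have hletter : letter = pvChar (ch.toNat - 97) := by
            apply String.toList_injective
            rw [hl]
            simp only [pvChar, String.toList_singleton]
            have : 97 + (ch.toNat - 97) = ch.toNat := by omega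
            rw [this, Char.ofNat_toNat]
          -- the doubled-root table
          have hroots := inv_iter parents hok 5
          rw [← foldl_doubleStep 5] at hroots
          set roots := (List.range 5).foldl (fun rs _ => doubleStep rs)
              ((List.range 26).map (fun i => parents.getD i "")) with hrootsdef
          have hstable : ∀ j, j < 26 →
              (pvStep parents)^[2 ^ 5] j = (pvStep parents)^[26] j := by
            intro j hj
            have : (2 : Nat) ^ 5 = 26 + 6 := by norm_num
            rw [this, iterate_stable parents hok j hj 6]
          have hgetD : ∀ j, j < 26 → roots.getD j "" = pvChar ((pvStep parents)^[26] j) := by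
            intro j hj
            rw [inv_getD roots _ hroots j hj, hstable j hj]
          have hfind : ∀ j, j < 26 →
              pvFind 30 (pvChar j) parents = some (roots.getD j "") := by
            intro j hj
            rw [hgetD j hj]
            exact pvFind_eq parents hok 26 30 j hj (by omega) (table_fix parents hok j hj)
          have hlet : pvFind 30 letter parents = some (roots.getD (ch.toNat - 97) "") := by
            rw [hletter]; exact hfind _ hli
          have hH : ∀ j ∈ List.range 26,
              j < 26 ∧ pvFind 30 (pvChar j) parents = some (roots.getD j "") := by
            intro j hj
            rw [List.mem_range] at hj
            exact ⟨hj, hfind j hj⟩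
          rw [hp, if_neg (by simp), if_neg (by simp)]
          rw [aScan1_eq seen parents letter roots (roots.getD (ch.toNat - 97) "") hlet
            (List.range 26) hH, aScan2_eq seen (List.range 26)]
        · rw [if_pos (by simpa using hp), if_pos (by simpa using hp)]

-- ===== VERDICT (by name: the statement is the Claim_ definition above) =====
theorem assignParent_spec : Claim_equal_assignParent := by
  intro seen parents letter _ hpre
  unfold Spec_assignParent
  exact assignParent_eq seen parents letter hpre
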